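-- pv_equiv track=rewrite | github.com/DARSHAN-V-G/social_networks_community_hiding | hs_algorithm.py | compute_rho_max
-- ===== SOURCE A (Python) =====
-- def compute_rho_max(n):
--     dist=0
--     for k in range(1,n+1):
--         m=n-k
--         r=m*(m+1)//2
--         l=k*(k-1)//2
--         dist+= r + l
--     return dist
-- ===== SOURCE B (Python) =====
-- def compute_rho_max(n):
--     if n < 1:
--         return 0
--     return n * (n * n - 1) // 3
-- ===== Notes on version B (the rewrite author's own statement) =====
-- stated objective: faster
-- what changed: Replaces the O(n) loop summing the two triangular numbers per k with the closed-form polynomial n*(n^2-1)//3 (0 for n<1).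
import Mathlib
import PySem

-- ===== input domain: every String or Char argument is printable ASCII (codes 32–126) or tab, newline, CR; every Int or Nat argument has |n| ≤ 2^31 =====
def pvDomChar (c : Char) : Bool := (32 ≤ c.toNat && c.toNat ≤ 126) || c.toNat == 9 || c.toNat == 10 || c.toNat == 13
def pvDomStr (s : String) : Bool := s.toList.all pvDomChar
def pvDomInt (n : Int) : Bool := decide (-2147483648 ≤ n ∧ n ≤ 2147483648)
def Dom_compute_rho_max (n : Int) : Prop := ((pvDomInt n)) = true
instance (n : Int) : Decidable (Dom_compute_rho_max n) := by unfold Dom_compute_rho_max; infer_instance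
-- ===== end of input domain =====

-- B replaces A's O(n) loop over k with the closed-form polynomial n*(n*n-1)//3 (0 for n < 1).

-- ===== PORT A =====
def compute_rho_max (n : Int) : Int :=
  (PySem.List.pyRange 1 (n + 1) 1).foldl
    (fun dist k =>
      let m := n - k
      let r := PySem.Int.floordiv (m * (m + 1)) 2
      let l := PySem.Int.floordiv (k * (k - 1)) 2
      dist + (r + l)) 0

-- ===== PORT B =====
def compute_rho_max_alt (n : Int) : Int :=
  if n < 1 then 0 else PySem.Int.floordiv (n * (n * n - 1)) 3

-- ===== PRECONDITION & SPEC =====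
def Spec_compute_rho_max (n : Int) (out : Int) : Prop := out = compute_rho_max_alt n
instance (n : Int) (out : Int) : Decidable (Spec_compute_rho_max n out) := by unfold Spec_compute_rho_max; infer_instance

-- ===== CLAIM (what is proved, stated in full; the proofs are below) =====
def Claim_equal_compute_rho_max : Prop := ∀ (n : Int), Dom_compute_rho_max n → Spec_compute_rho_max n (compute_rho_max n)

-- ===== LEMMAS AND PROOFS =====

-- 6 * (a // 2) = 3 * a when a is even
theorem pv_six_fd2 (a : Int) (h : 2 ∣ a) : 6 * PySem.Int.floordiv a 2 = 3 * a := by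
  rw [PySem.Int.floordiv_eq_ediv_of_pos (by norm_num)]
  omega

theorem pv_even_mul_succ (m : Int) : 2 ∣ m * (m + 1) := by
  rcases Int.even_mul_succ_self m with ⟨c, hc⟩
  exact ⟨c, by omega⟩

theorem pv_even_mul_pred (k : Int) : 2 ∣ k * (k - 1) := by
  rcases Int.even_mul_succ_self (k - 1) with ⟨c, hc⟩
  exact ⟨c, by ring_nf; ring_nf at hc; omega⟩

-- loop invariant: six times A's partial sum has the closed polynomial form
theorem pv_loop (n : Int) (N : ℕ) (acc : Int) :
    6 * (((List.range N).map (fun k : ℕ => (1 : Int) + (k : Int))).foldl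
      (fun dist k => dist +
        (PySem.Int.floordiv ((n - k) * (n - k + 1)) 2 +
         PySem.Int.floordiv (k * (k - 1)) 2)) acc)
    = 6 * acc + (3 * N * (n * n + n) - 3 * (n + 1) * N * (N + 1) + N * (N + 1) * (2 * N + 1)) := by
  induction N generalizing acc with
  | zero => simp
  | succ N ih =>
    rw [List.range_succ, List.map_append, List.foldl_append]
    simp only [List.map_cons, List.map_nil, List.foldl_cons, List.foldl_nil]
    have ihh := ih acc
    have h1 := pv_six_fd2 _ (pv_even_mul_succ (n - (1 + (N : Int))))
    have h2 := pv_six_fd2 _ (pv_even_mul_pred ((1 : Int) + (N : Int)))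
    push_cast at ihh h1 h2 ⊢
    ring_nf at ihh h1 h2 ⊢
    linarith [ihh, h1, h2]

-- ===== VERDICT (by name: the statement is the Claim_ definition above) =====
theorem compute_rho_max_spec : Claim_equal_compute_rho_max := by
  intro n _
  unfold Spec_compute_rho_max
  by_cases hn : n < 1
  · unfold compute_rho_max compute_rho_max_alt
    rw [PySem.List.pyRange_one]
    have h0 : (n + 1 - 1).toNat = 0 := by omega
    rw [h0]
    simp [hn]
  · have hN : ((n + 1 - 1).toNat : Int) = n := by omega
    have h6 : 6 * compute_rho_max n = 2 * (n * (n * n - 1)) := by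
      unfold compute_rho_max
      rw [PySem.List.pyRange_one]
      have h := pv_loop n (n + 1 - 1).toNat 0
      rw [hN] at h
      exact h.trans (by ring)
    have hy : n * (n * n - 1) = 3 * compute_rho_max n := by linarith
    have h3 : PySem.Int.floordiv (3 * compute_rho_max n) 3 = compute_rho_max n := by
      rw [PySem.Int.floordiv_eq_ediv_of_pos (by norm_num),
        Int.mul_ediv_cancel_left _ (by norm_num)]
    unfold compute_rho_max_alt
    rw [if_neg hn, hy, h3]
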